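-- pv_equiv track=rewrite | github.com/Marlinski/AoC2024 | day-22/second.py | highest_bid
-- ===== SOURCE A (Python) =====
-- def highest_bid(secret, n):
--     window = [0]*4
--     spread = {}
--     for i in range(n):
--         prev = secret
--         secret = (secret ^ (secret * 64))   % 16777216
--         secret = (secret ^ (secret // 32))  % 16777216
--         secret = (secret ^ (secret * 2048)) % 16777216
--         window[i % 4] = ((secret % 10) - (prev % 10))
--         if i > 3:
--             key = ",".join(str(window[j % 4]) for j in range(i+1, i+5, 1))
--             if key not in spread:
--                 spread[key] = secret % 10
--     return spread
-- ===== SOURCE B (Python) =====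
-- def highest_bid(secret, n):
--     # two-pass: collect all prices first, then slide a window over the diffs
--     prices = [secret % 10]
--     s = secret
--     for _ in range(n):
--         s = (s ^ (s * 64)) % 16777216
--         s = (s ^ (s // 32)) % 16777216
--         s = (s ^ (s * 2048)) % 16777216
--         prices.append(s % 10)
--     diffs = [b - a for a, b in zip(prices, prices[1:])]
--     strs = [str(d) for d in diffs]
--     spread = {}
--     # windows over the diffs via offset slices, starting at the SECOND window
--     for d1, d2, d3, d4, p in zip(strs[1:], strs[2:], strs[3:], strs[4:], prices[5:]):
--         key = ",".join((d1, d2, d3, d4))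
--         if key not in spread:
--             spread[key] = p
--     return spread
-- ===== Notes on version B (the rewrite author's own statement) =====
-- stated objective: alternative
-- what changed: B replaces A's single pass with a circular 4-slot buffer and per-iteration modular key reconstruction (a generator over j%4) by two plain passes: collect the full price list from the PRNG, derive the diff list by zipping adjacent prices, then slide over the windows via one zip of four offset diff slices (starting at the second window, as A's i>3 guard does).
import Mathlib
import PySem

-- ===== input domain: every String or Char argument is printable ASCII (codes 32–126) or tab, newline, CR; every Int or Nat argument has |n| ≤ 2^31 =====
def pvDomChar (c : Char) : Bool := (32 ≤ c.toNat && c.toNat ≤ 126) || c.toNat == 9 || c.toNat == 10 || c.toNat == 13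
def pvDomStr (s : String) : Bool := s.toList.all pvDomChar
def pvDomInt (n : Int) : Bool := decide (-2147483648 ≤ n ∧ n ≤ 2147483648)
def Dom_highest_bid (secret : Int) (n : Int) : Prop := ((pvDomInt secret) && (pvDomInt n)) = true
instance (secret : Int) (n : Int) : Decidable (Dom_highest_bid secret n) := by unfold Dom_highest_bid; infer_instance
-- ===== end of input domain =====

-- B replaces A's one-pass circular 4-slot buffer (with modular key reconstruction) by two plain
-- passes: collect the price list, zip it with itself to get the diff list, then slide a direct
-- 4-wide slice window over the diffs; same O(n) cost, identical return value.

-- ===== PORT A =====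
-- the three PRNG lines both Pythons contain verbatim, as one shared helper
def pvStep (s : Int) : Int :=
  let s1 := PySem.Int.mod (PySem.Int.bxor s (s * 64)) 16777216
  let s2 := PySem.Int.mod (PySem.Int.bxor s1 (PySem.Int.floordiv s1 32)) 16777216
  PySem.Int.mod (PySem.Int.bxor s2 (s2 * 2048)) 16777216

def highest_bid (secret : Int) (n : Int) : List (String × Int) :=
  let st := (PySem.List.pyRange 0 n 1).foldl
    (fun (st : Int × List Int × PySem.Dict String Int) i =>
      let secret := st.1
      let window := st.2.1
      let spread := st.2.2
      let prev := secret
      let secret := pvStep secret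
      let window := PySem.List.pySetD window (PySem.Int.mod i 4)
        (PySem.Int.mod secret 10 - PySem.Int.mod prev 10)
      let spread :=
        if i > 3 then
          let key := PySem.Str.join ","
            ((PySem.List.pyRange (i + 1) (i + 5) 1).map
              (fun j => PySem.Int.toStr (PySem.List.pyGetD window (PySem.Int.mod j 4) 0)))
          if spread.contains key then spread
          else spread.insert key (PySem.Int.mod secret 10)
        else spread
      (secret, window, spread))
    (secret, ([0, 0, 0, 0] : List Int), (PySem.Dict.empty : PySem.Dict String Int))
  st.2.2.items

-- ===== PORT B =====
-- the price-collecting loop of Source B, built front-first (same list of prices, in order)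
def pvGen (s : Int) : Nat → List Int
  | 0 => []
  | k + 1 =>
    let t := pvStep s
    PySem.Int.mod t 10 :: pvGen t k

def highest_bid_alt (secret : Int) (n : Int) : List (String × Int) :=
  let prices := PySem.Int.mod secret 10 :: pvGen secret n.toNat
  let diffs := (prices.zip (PySem.List.slice prices (some 1) none)).map (fun ab => ab.2 - ab.1)
  let strs := diffs.map (fun d => PySem.Int.toStr d)
  let spread := ((PySem.List.slice strs (some 1) none).zip
      ((PySem.List.slice strs (some 2) none).zip
        ((PySem.List.slice strs (some 3) none).zip
          ((PySem.List.slice strs (some 4) none).zip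
            (PySem.List.slice prices (some 5) none))))).foldl
    (fun (spread : PySem.Dict String Int) w =>
      let key := PySem.Str.join "," [w.1, w.2.1, w.2.2.1, w.2.2.2.1]
      if spread.contains key then spread
      else spread.insert key w.2.2.2.2)
    PySem.Dict.empty
  spread.items

-- ===== PRECONDITION & SPEC =====
def Spec_highest_bid (secret : Int) (n : Int) (out : List (String × Int)) : Prop := out = highest_bid_alt secret n
instance (secret : Int) (n : Int) (out : List (String × Int)) : Decidable (Spec_highest_bid secret n out) := by unfold Spec_highest_bid; infer_instance

-- ===== CLAIM (what is proved, stated in full; the proofs are below) =====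
def Claim_equal_highest_bid : Prop := ∀ (secret : Int) (n : Int), Dom_highest_bid secret n → Spec_highest_bid secret n (highest_bid secret n)

-- ===== LEMMAS AND PROOFS =====

-- secret after k PRNG steps
def pvIter (s0 : Int) : Nat → Int
  | 0 => s0
  | k + 1 => pvStep (pvIter s0 k)

def pvPrice (s0 : Int) (k : Nat) : Int := PySem.Int.mod (pvIter s0 k) 10

def pvDiff (s0 : Int) (k : Nat) : Int := pvPrice s0 (k + 1) - pvPrice s0 k

-- A's window content after m iterations: slot r holds the diff of the latest iteration ≡ r (mod 4)
def pvWinEntry (s0 : Int) (m r : Nat) : Int :=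
  if r < m then pvDiff s0 (m - 1 - (m - 1 - r) % 4) else 0

def pvWin (s0 : Int) (m : Nat) : List Int :=
  [pvWinEntry s0 m 0, pvWinEntry s0 m 1, pvWinEntry s0 m 2, pvWinEntry s0 m 3]

def pvKey (s0 : Int) (m : Nat) : String :=
  PySem.Str.join "," [PySem.Int.toStr (pvDiff s0 (m - 3)), PySem.Int.toStr (pvDiff s0 (m - 2)),
    PySem.Int.toStr (pvDiff s0 (m - 1)), PySem.Int.toStr (pvDiff s0 m)]

-- reference spread after m iterations
def pvSpread (s0 : Int) (m : Nat) : PySem.Dict String Int :=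
  (List.range m).foldl
    (fun spread i =>
      if 3 < i then
        if spread.contains (pvKey s0 i) then spread
        else spread.insert (pvKey s0 i) (pvPrice s0 (i + 1))
      else spread)
    PySem.Dict.empty

theorem pvSpread_succ (s0 : Int) (m : Nat) :
    pvSpread s0 (m + 1) =
      if 3 < m then
        (if (pvSpread s0 m).contains (pvKey s0 m) then pvSpread s0 m
         else (pvSpread s0 m).insert (pvKey s0 m) (pvPrice s0 (m + 1)))
      else pvSpread s0 m := by
  unfold pvSpread
  rw [List.range_succ, List.foldl_append, List.foldl_cons, List.foldl_nil]

theorem pvWin_set (s0 : Int) (m : Nat) :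
    (pvWin s0 m).set (m % 4) (pvDiff s0 m) = pvWin s0 (m + 1) := by
  have h4 : m % 4 = 0 ∨ m % 4 = 1 ∨ m % 4 = 2 ∨ m % 4 = 3 := by omega
  rcases h4 with h | h | h | h
  · rw [h]
    show [pvDiff s0 m, pvWinEntry s0 m 1, pvWinEntry s0 m 2, pvWinEntry s0 m 3] = pvWin s0 (m + 1)
    simp only [pvWin, List.cons.injEq, and_true]
    refine ⟨?_, ?_, ?_, ?_⟩ <;>
      (simp only [pvWinEntry]; split_ifs <;>
        first | rfl | (exact congrArg (pvDiff s0) (by omega)) | (exfalso; omega))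
  · rw [h]
    show [pvWinEntry s0 m 0, pvDiff s0 m, pvWinEntry s0 m 2, pvWinEntry s0 m 3] = pvWin s0 (m + 1)
    simp only [pvWin, List.cons.injEq, and_true]
    refine ⟨?_, ?_, ?_, ?_⟩ <;>
      (simp only [pvWinEntry]; split_ifs <;>
        first | rfl | (exact congrArg (pvDiff s0) (by omega)) | (exfalso; omega))
  · rw [h]
    show [pvWinEntry s0 m 0, pvWinEntry s0 m 1, pvDiff s0 m, pvWinEntry s0 m 3] = pvWin s0 (m + 1)
    simp only [pvWin, List.cons.injEq, and_true]
    refine ⟨?_, ?_, ?_, ?_⟩ <;>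
      (simp only [pvWinEntry]; split_ifs <;>
        first | rfl | (exact congrArg (pvDiff s0) (by omega)) | (exfalso; omega))
  · rw [h]
    show [pvWinEntry s0 m 0, pvWinEntry s0 m 1, pvWinEntry s0 m 2, pvDiff s0 m] = pvWin s0 (m + 1)
    simp only [pvWin, List.cons.injEq, and_true]
    refine ⟨?_, ?_, ?_, ?_⟩ <;>
      (simp only [pvWinEntry]; split_ifs <;>
        first | rfl | (exact congrArg (pvDiff s0) (by omega)) | (exfalso; omega))

theorem getD_pvWin (s0 : Int) (m r : Nat) (hr : r < 4) :
    List.getD (pvWin s0 m) r 0 = pvWinEntry s0 m r := by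
  interval_cases r <;> rfl

theorem pvWin_read (s0 : Int) (m k e : Nat) (j : Int) (hm : 4 ≤ m) (hk : 1 ≤ k) (hk4 : k ≤ 4)
    (hj : j = (m : Int) + (k : Int)) (he : m - (m - (m + k) % 4) % 4 = e) :
    PySem.List.pyGetD (pvWin s0 (m + 1)) (PySem.Int.mod j 4) 0 = pvDiff s0 e := by
  rw [hj, show ((m : Int) + (k : Int)) = (((m + k : Nat)) : Int) from by push_cast; ring,
    PySem.Int.mod_eq_emod_of_pos (by norm_num),
    show (((m + k : Nat)) : Int) % 4 = ((((m + k) % 4 : Nat)) : Int) from by omega,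
    PySem.List.pyGetD_natCast, getD_pvWin s0 (m + 1) _ (by omega)]
  simp only [pvWinEntry]
  rw [if_pos (by omega)]
  exact congrArg (pvDiff s0) (by omega)

theorem highest_bid_A_inv (s0 : Int) (m : Nat) :
    (PySem.List.pyRange 0 (m : Int) 1).foldl
      (fun (st : Int × List Int × PySem.Dict String Int) i =>
        let secret := st.1
        let window := st.2.1
        let spread := st.2.2
        let prev := secret
        let secret := pvStep secret
        let window := PySem.List.pySetD window (PySem.Int.mod i 4)
          (PySem.Int.mod secret 10 - PySem.Int.mod prev 10)
        let spread :=
          if i > 3 then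
            let key := PySem.Str.join ","
              ((PySem.List.pyRange (i + 1) (i + 5) 1).map
                (fun j => PySem.Int.toStr (PySem.List.pyGetD window (PySem.Int.mod j 4) 0)))
            if spread.contains key then spread
            else spread.insert key (PySem.Int.mod secret 10)
          else spread
        (secret, window, spread))
      (s0, ([0, 0, 0, 0] : List Int), (PySem.Dict.empty : PySem.Dict String Int))
    = (pvIter s0 m, pvWin s0 m, pvSpread s0 m) := by
  induction m with
  | zero =>
    rw [PySem.List.pyRange_one_eq_nil (by omega), List.foldl_nil]
    rfl
  | succ m ih =>
    rw [show (((m + 1 : Nat)) : Int) = ((m : Nat) : Int) + 1 from by omega,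
      PySem.List.pyRange_one_succ_right (by omega), List.foldl_append, ih]
    simp only [List.foldl_cons, List.foldl_nil]
    rw [PySem.Int.mod_eq_emod_of_pos (by norm_num : (0:Int) < 4),
      show ((m : Int) % 4) = (((m % 4 : Nat)) : Int) from by omega,
      PySem.List.pySetD_natCast,
      show PySem.Int.mod (pvStep (pvIter s0 m)) 10 - PySem.Int.mod (pvIter s0 m) 10
        = pvDiff s0 m from rfl,
      pvWin_set]
    by_cases h3 : 3 < m
    · rw [if_pos (show ((m : Int)) > 3 from by omega)]
      rw [PySem.List.pyRange_one_cons (by omega), PySem.List.pyRange_one_cons (by omega),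
        PySem.List.pyRange_one_cons (by omega), PySem.List.pyRange_one_cons (by omega),
        PySem.List.pyRange_one_eq_nil (by omega)]
      simp only [List.map_cons, List.map_nil]
      rw [pvWin_read s0 m 1 (m - 3) ((m : Int) + 1) (by omega) (by norm_num) (by norm_num)
          (by push_cast; ring) (by omega),
        pvWin_read s0 m 2 (m - 2) ((m : Int) + 1 + 1) (by omega) (by norm_num) (by norm_num)
          (by push_cast; ring) (by omega),
        pvWin_read s0 m 3 (m - 1) ((m : Int) + 1 + 1 + 1) (by omega) (by norm_num) (by norm_num)
          (by push_cast; ring) (by omega),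
        pvWin_read s0 m 4 m ((m : Int) + 1 + 1 + 1 + 1) (by omega) (by norm_num) (by norm_num)
          (by push_cast; ring) (by omega)]
      rw [pvSpread_succ, if_pos h3]
      rfl
    · rw [if_neg (show ¬ ((m : Int)) > 3 from by omega), pvSpread_succ, if_neg h3]
      rfl

theorem pvGen_eq (s0 : Int) : ∀ (k j : Nat),
    pvGen (pvIter s0 j) k = (List.range k).map (fun t => pvPrice s0 (j + 1 + t)) := by
  intro k
  induction k with
  | zero => intro j; rfl
  | succ k ih =>
    intro j
    show PySem.Int.mod (pvStep (pvIter s0 j)) 10 :: pvGen (pvStep (pvIter s0 j)) k = _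
    rw [show pvStep (pvIter s0 j) = pvIter s0 (j + 1) from rfl, ih (j + 1),
      List.range_succ_eq_map, List.map_cons, List.map_map]
    refine congrArg₂ List.cons rfl ?_
    exact List.map_congr_left (fun a _ => congrArg (pvPrice s0) (by omega))

theorem pvPrices_eq (s0 : Int) (N : Nat) :
    PySem.Int.mod s0 10 :: pvGen s0 N = (List.range (N + 1)).map (pvPrice s0) := by
  rw [show pvGen s0 N = pvGen (pvIter s0 0) N from rfl, pvGen_eq s0 N 0,
    List.range_succ_eq_map, List.map_cons, List.map_map]
  refine congrArg₂ List.cons rfl ?_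
  exact List.map_congr_left (fun a _ => congrArg (pvPrice s0) (by omega))

theorem pvDiffs_eq (s0 : Int) (N : Nat) :
    ((((List.range (N + 1)).map (pvPrice s0)).zip
        (PySem.List.slice ((List.range (N + 1)).map (pvPrice s0)) (some 1) none)).map
      (fun ab => ab.2 - ab.1))
    = (List.range N).map (pvDiff s0) := by
  rw [PySem.List.slice_from_one]
  apply List.ext_getElem
  · simp only [List.length_map, List.length_zip, List.length_tail, List.length_range]
    omega
  · intro i h1 h2
    simp only [List.getElem_map, List.getElem_zip, List.getElem_tail, List.getElem_range]
    rfl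

theorem pvZip5_eq (s0 : Int) (N : Nat) :
    ((PySem.List.slice (((List.range N).map (pvDiff s0)).map (fun d => PySem.Int.toStr d)) (some 1) none).zip
      ((PySem.List.slice (((List.range N).map (pvDiff s0)).map (fun d => PySem.Int.toStr d)) (some 2) none).zip
        ((PySem.List.slice (((List.range N).map (pvDiff s0)).map (fun d => PySem.Int.toStr d)) (some 3) none).zip
          ((PySem.List.slice (((List.range N).map (pvDiff s0)).map (fun d => PySem.Int.toStr d)) (some 4) none).zip
            (PySem.List.slice ((List.range (N + 1)).map (pvPrice s0)) (some 5) none)))))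
    = (List.range (N - 4)).map (fun t =>
        (PySem.Int.toStr (pvDiff s0 (1 + t)), (PySem.Int.toStr (pvDiff s0 (2 + t)),
          (PySem.Int.toStr (pvDiff s0 (3 + t)),
            (PySem.Int.toStr (pvDiff s0 (4 + t)), pvPrice s0 (5 + t)))))) := by
  have hs : ∀ {α : Type} (l : List α) (a : Int), 0 ≤ a →
      PySem.List.slice l (some a) none = l.drop a.toNat :=
    fun l a h => PySem.List.slice_from l h
  rw [hs _ 1 (by norm_num), hs _ 2 (by norm_num), hs _ 3 (by norm_num),
    hs _ 4 (by norm_num), hs _ 5 (by norm_num),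
    show (1 : Int).toNat = 1 from rfl, show (2 : Int).toNat = 2 from rfl,
    show (3 : Int).toNat = 3 from rfl, show (4 : Int).toNat = 4 from rfl,
    show (5 : Int).toNat = 5 from rfl]
  apply List.ext_getElem
  · simp only [List.length_zip, List.length_drop, List.length_map, List.length_range]
    omega
  · intro i h1 h2
    simp only [List.getElem_zip, List.getElem_drop, List.getElem_map, List.getElem_range]

theorem pvSpread_le4 (s0 : Int) (m : Nat) (hm : m ≤ 4) : pvSpread s0 m = PySem.Dict.empty := by
  interval_cases m <;> rfl

theorem pvFold_eq (s0 : Int) (N : Nat) : ∀ (r : Nat), 4 + r ≤ N →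
    ((List.range r).map (fun t =>
        (PySem.Int.toStr (pvDiff s0 (1 + t)), (PySem.Int.toStr (pvDiff s0 (2 + t)),
          (PySem.Int.toStr (pvDiff s0 (3 + t)),
            (PySem.Int.toStr (pvDiff s0 (4 + t)), pvPrice s0 (5 + t))))))).foldl
      (fun (spread : PySem.Dict String Int) w =>
        let key := PySem.Str.join "," [w.1, w.2.1, w.2.2.1, w.2.2.2.1]
        if spread.contains key then spread
        else spread.insert key w.2.2.2.2)
      PySem.Dict.empty
    = pvSpread s0 (4 + r) := by
  intro r
  induction r with
  | zero =>
    intro _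
    simp only [List.range_zero, List.map_nil, List.foldl_nil]
    rfl
  | succ r ih =>
    intro hr
    have hkey : PySem.Str.join "," [PySem.Int.toStr (pvDiff s0 (1 + r)),
        PySem.Int.toStr (pvDiff s0 (2 + r)), PySem.Int.toStr (pvDiff s0 (3 + r)),
        PySem.Int.toStr (pvDiff s0 (4 + r))] = pvKey s0 (4 + r) := by
      rw [show (1 + r) = 4 + r - 3 from by omega, show (2 + r) = 4 + r - 2 from by omega,
        show (3 + r) = 4 + r - 1 from by omega]
      rfl
    have hval : pvPrice s0 (5 + r) = pvPrice s0 ((4 + r) + 1) :=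
      congrArg (pvPrice s0) (by omega)
    rw [List.range_succ, List.map_append, List.foldl_append, ih (by omega)]
    simp only [List.foldl_cons, List.foldl_nil, List.map_cons, List.map_nil]
    rw [hkey, hval, show 4 + (r + 1) = (4 + r) + 1 from by omega, pvSpread_succ,
      if_pos (show 3 < 4 + r from by omega)]

-- ===== VERDICT (by name: the statement is the Claim_ definition above) =====
theorem highest_bid_spec : Claim_equal_highest_bid := by
  intro secret n _
  show highest_bid secret n = highest_bid_alt secret n
  by_cases hn : 0 ≤ n
  · obtain ⟨N, rfl⟩ : ∃ N : Nat, n = (N : Int) := ⟨n.toNat, by omega⟩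
    simp only [highest_bid, highest_bid_alt]
    rw [highest_bid_A_inv, Int.toNat_natCast, pvPrices_eq, pvDiffs_eq, pvZip5_eq]
    dsimp only
    by_cases h4 : 4 ≤ N
    · rw [pvFold_eq secret N (N - 4) (by omega), show 4 + (N - 4) = N from by omega]
    · rw [show N - 4 = 0 from by omega]
      simp only [List.range_zero, List.map_nil, List.foldl_nil]
      rw [pvSpread_le4 secret N (by omega)]
  · simp only [highest_bid, highest_bid_alt]
    rw [PySem.List.pyRange_one_eq_nil (by omega : n ≤ (0 : Int)),
      show n.toNat = 0 from by omega]
    rfl
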